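-- pv_equiv track=rewrite | github.com/danielp6r/PythonExercicios | Resolução/DP-Alg-07-Ex-02.py | df
-- ===== SOURCE A (Python) =====
-- def df(M={}, N={}):
--     x = []
--     for i in M:
--         if i not in N:
--             x.append(i)
--     for i in N:
--         if i not in M:
--             x.append(i)
--     x = sorted(x)
--     return x
-- ===== SOURCE B (Python) =====
-- def df(M={}, N={}):
--     # Sort both key lists first, then a single two-pointer merge emits keys
--     # present in exactly one dict, already in sorted order (no membership tests,
--     # no final sort of the result).
--     a = sorted(M)
--     b = sorted(N)
--     out = []
--     i = j = 0
--     while i < len(a) and j < len(b):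
--         if a[i] < b[j]:
--             out.append(a[i]); i += 1
--         elif b[j] < a[i]:
--             out.append(b[j]); j += 1
--         else:
--             i += 1; j += 1
--     out.extend(a[i:])
--     out.extend(b[j:])
--     return out
-- ===== Notes on version B (the rewrite author's own statement) =====
-- stated objective: alternative
-- what changed: Instead of A's two filtering loops with per-key membership tests and a final sort of the collected list, B sorts the two key lists first and produces the symmetric difference with a single two-pointer merge that emits the output already in order (no membership tests, no sort of the result).
import Mathlib
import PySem

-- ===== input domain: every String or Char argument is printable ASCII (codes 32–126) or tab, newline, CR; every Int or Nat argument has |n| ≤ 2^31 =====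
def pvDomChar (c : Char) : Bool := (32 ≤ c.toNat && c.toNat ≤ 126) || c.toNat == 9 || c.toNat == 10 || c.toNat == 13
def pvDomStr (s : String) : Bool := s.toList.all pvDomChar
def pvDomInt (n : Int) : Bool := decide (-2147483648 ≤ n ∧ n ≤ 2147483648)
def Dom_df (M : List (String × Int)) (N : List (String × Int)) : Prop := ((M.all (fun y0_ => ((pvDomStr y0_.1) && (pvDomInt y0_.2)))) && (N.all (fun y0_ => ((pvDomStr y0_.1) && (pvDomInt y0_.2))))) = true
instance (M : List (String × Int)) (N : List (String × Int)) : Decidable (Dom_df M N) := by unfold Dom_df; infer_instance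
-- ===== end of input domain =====

-- B replaces A's two membership-filtering loops + final sort by sorting the two key
-- lists first and emitting the symmetric difference with one two-pointer merge.

-- ===== PORT A =====
-- 'for i in M' iterates the dict's unique keys in insertion order: PySem.List.dedup of the key list.
def df (M : List (String × Int)) (N : List (String × Int)) : List String :=
  let mk := PySem.List.dedup (M.map (·.1))
  let nk := PySem.List.dedup (N.map (·.1))
  let x : List String := []
  let x := mk.foldl (fun x i => if nk.contains i then x else x ++ [i]) x
  let x := nk.foldl (fun x i => if mk.contains i then x else x ++ [i]) x
  PySem.List.sorted x (fun k => k) false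

-- ===== PORT B =====
-- B's while loop over indices i, j: the obvious recursion over the two remaining suffixes.
def mergeSD : List String → List String → List String
  | [], b => b
  | a, [] => a
  | x :: xs, y :: ys =>
    if x < y then x :: mergeSD xs (y :: ys)
    else if y < x then y :: mergeSD (x :: xs) ys
    else mergeSD xs ys

def df_alt (M : List (String × Int)) (N : List (String × Int)) : List String :=
  let a := PySem.List.sorted (PySem.List.dedup (M.map (·.1))) (fun k => k) false
  let b := PySem.List.sorted (PySem.List.dedup (N.map (·.1))) (fun k => k) false
  mergeSD a b

-- ===== PRECONDITION & SPEC =====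
def Spec_df (M : List (String × Int)) (N : List (String × Int)) (out : List String) : Prop := out = df_alt M N
instance (M : List (String × Int)) (N : List (String × Int)) (out : List String) : Decidable (Spec_df M N out) := by unfold Spec_df; infer_instance

-- ===== CLAIM (what is proved, stated in full; the proofs are below) =====
def Claim_equal_df : Prop := ∀ (M : List (String × Int)) (N : List (String × Int)), Dom_df M N → Spec_df M N (df M N)

-- ===== LEMMAS AND PROOFS =====

-- A's 'if i not in t: x.append(i)' loop is 'x ++ filter (∉ t)'.
theorem foldl_skip_if_contains {α : Type} [BEq α] (t : List α) :
    ∀ (l acc : List α),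
      l.foldl (fun x i => if t.contains i then x else x ++ [i]) acc
        = acc ++ l.filter (fun i => !(t.contains i)) := by
  intro l
  induction l with
  | nil => intro acc; simp
  | cons h tl ih =>
    intro acc
    by_cases hc : t.contains h
    · simp [List.foldl_cons, hc, ih]
    · simp [List.foldl_cons, hc, ih]

-- Every element of mergeSD a b comes from a or b.
theorem mem_mergeSD {z : String} : ∀ {a b : List String}, z ∈ mergeSD a b → z ∈ a ∨ z ∈ b := by
  intro a b
  induction a, b using mergeSD.induct with
  | case1 b => intro h; simp only [mergeSD] at h; exact Or.inr h
  | case2 a h => intro hz; simp only [mergeSD] at hz; exact Or.inl hz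
  | case3 x xs y ys hlt ih =>
    intro hz
    rw [mergeSD, if_pos hlt] at hz
    rcases List.mem_cons.mp hz with rfl | hz
    · exact Or.inl List.mem_cons_self
    · rcases ih hz with h | h
      · exact Or.inl (List.mem_cons_of_mem _ h)
      · exact Or.inr h
  | case4 x xs y ys hnlt hlt ih =>
    intro hz
    rw [mergeSD, if_neg hnlt, if_pos hlt] at hz
    rcases List.mem_cons.mp hz with rfl | hz
    · exact Or.inr List.mem_cons_self
    · rcases ih hz with h | h
      · exact Or.inl h
      · exact Or.inr (List.mem_cons_of_mem _ h)
  | case5 x xs y ys hnlt hnlt' ih =>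
    intro hz
    rw [mergeSD, if_neg hnlt, if_neg hnlt'] at hz
    rcases ih hz with h | h
    · exact Or.inl (List.mem_cons_of_mem _ h)
    · exact Or.inr (List.mem_cons_of_mem _ h)

-- The merge of two strictly sorted lists is strictly sorted.
theorem pairwise_mergeSD : ∀ {a b : List String},
    a.Pairwise (· < ·) → b.Pairwise (· < ·) → (mergeSD a b).Pairwise (· < ·) := by
  intro a b
  induction a, b using mergeSD.induct with
  | case1 b => intro _ hb; simp only [mergeSD]; exact hb
  | case2 a h => intro ha _; simp only [mergeSD]; exact ha
  | case3 x xs y ys hlt ih =>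
    intro ha hb
    rw [mergeSD, if_pos hlt]
    rcases List.pairwise_cons.mp ha with ⟨hxa, hxs⟩
    refine List.pairwise_cons.mpr ⟨?_, ih hxs hb⟩
    intro z hz
    rcases mem_mergeSD hz with h | h
    · exact hxa z h
    · rcases List.mem_cons.mp h with rfl | h
      · exact hlt
      · exact lt_trans hlt ((List.pairwise_cons.mp hb).1 z h)
  | case4 x xs y ys hnlt hlt ih =>
    intro ha hb
    rw [mergeSD, if_neg hnlt, if_pos hlt]
    rcases List.pairwise_cons.mp hb with ⟨hyb, hys⟩
    refine List.pairwise_cons.mpr ⟨?_, ih ha hys⟩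
    intro z hz
    rcases mem_mergeSD hz with h | h
    · rcases List.mem_cons.mp h with rfl | h
      · exact hlt
      · exact lt_trans hlt ((List.pairwise_cons.mp ha).1 z h)
    · exact hyb z h
  | case5 x xs y ys hnlt hnlt' ih =>
    intro ha hb
    rw [mergeSD, if_neg hnlt, if_neg hnlt']
    exact ih (List.pairwise_cons.mp ha).2 (List.pairwise_cons.mp hb).2

-- On strictly sorted inputs the merge is a permutation of the two filtered suffix lists.
theorem mergeSD_perm : ∀ {a b : List String},
    a.Pairwise (· < ·) → b.Pairwise (· < ·) →
    (mergeSD a b).Perm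
      (a.filter (fun i => !(b.contains i)) ++ b.filter (fun i => !(a.contains i))) := by
  intro a b
  induction a, b using mergeSD.induct with
  | case1 b => intro _ _; simp [mergeSD]
  | case2 a h => intro _ _; simp only [mergeSD]; simp
  | case3 x xs y ys hlt ih =>
    intro ha hb
    rw [mergeSD, if_pos hlt]
    have hxnb : (y :: ys).contains x = false := by
      simp only [List.contains_eq_mem, decide_eq_false_iff_not, List.mem_cons]
      rintro (rfl | h)
      · exact lt_irrefl x hlt
      · exact lt_irrefl x (lt_trans hlt ((List.pairwise_cons.mp hb).1 x h))
    have hfb : (y :: ys).filter (fun i => !((x :: xs).contains i))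
             = (y :: ys).filter (fun i => !(xs.contains i)) := by
      apply List.filter_congr
      intro z hz
      have hxz : x ≠ z := by
        rintro rfl
        rcases List.mem_cons.mp hz with rfl | h
        · exact lt_irrefl x hlt
        · exact lt_irrefl x (lt_trans hlt ((List.pairwise_cons.mp hb).1 x h))
      simp [List.contains_eq_mem, List.mem_cons, Ne.symm hxz]
    rw [hfb, List.filter_cons_of_pos (by simp only [hxnb, Bool.not_false])]
    exact List.Perm.cons x (ih (List.pairwise_cons.mp ha).2 hb)
  | case4 x xs y ys hnlt hlt ih =>
    intro ha hb
    rw [mergeSD, if_neg hnlt, if_pos hlt]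
    have hyna : (x :: xs).contains y = false := by
      simp only [List.contains_eq_mem, decide_eq_false_iff_not, List.mem_cons]
      rintro (rfl | h)
      · exact lt_irrefl y hlt
      · exact lt_irrefl y (lt_trans hlt ((List.pairwise_cons.mp ha).1 y h))
    have hfa : (x :: xs).filter (fun i => !((y :: ys).contains i))
             = (x :: xs).filter (fun i => !(ys.contains i)) := by
      apply List.filter_congr
      intro z hz
      have hyz : y ≠ z := by
        rintro rfl
        rcases List.mem_cons.mp hz with rfl | h
        · exact lt_irrefl y hlt
        · exact lt_irrefl y (lt_trans hlt ((List.pairwise_cons.mp ha).1 y h))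
      simp [List.contains_eq_mem, List.mem_cons, Ne.symm hyz]
    have hcons : (y :: ys).filter (fun i => !((x :: xs).contains i))
               = y :: ys.filter (fun i => !((x :: xs).contains i)) := by
      have h' : ¬(y = x ∨ y ∈ xs) := by
        simpa [List.contains_eq_mem, List.mem_cons] using hyna
      simp only [List.filter_cons, List.contains_eq_mem, List.mem_cons,
        Bool.not_eq_true', decide_eq_false_iff_not, if_pos h']
    rw [hfa, hcons]
    exact (List.Perm.cons y (ih ha (List.pairwise_cons.mp hb).2)).trans List.perm_middle.symm
  | case5 x xs y ys hnlt hnlt' ih =>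
    intro ha hb
    rw [mergeSD, if_neg hnlt, if_neg hnlt']
    have hxy : x = y := le_antisymm (not_lt.mp hnlt') (not_lt.mp hnlt)
    subst hxy
    have hfa : (x :: xs).filter (fun i => !((x :: ys).contains i))
             = xs.filter (fun i => !(ys.contains i)) := by
      rw [List.filter_cons_of_neg (by simp [List.contains_eq_mem])]
      apply List.filter_congr
      intro z hz
      have hxz : x ≠ z := by
        rintro rfl
        exact lt_irrefl x ((List.pairwise_cons.mp ha).1 x hz)
      simp [List.contains_eq_mem, List.mem_cons, Ne.symm hxz]
    have hfb : (x :: ys).filter (fun i => !((x :: xs).contains i))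
             = ys.filter (fun i => !(xs.contains i)) := by
      rw [List.filter_cons_of_neg (by simp [List.contains_eq_mem])]
      apply List.filter_congr
      intro z hz
      have hxz : x ≠ z := by
        rintro rfl
        exact lt_irrefl x ((List.pairwise_cons.mp hb).1 x hz)
      simp [List.contains_eq_mem, List.mem_cons, Ne.symm hxz]
    rw [hfa, hfb]
    exact ih (List.pairwise_cons.mp ha).2 (List.pairwise_cons.mp hb).2

-- Filtering by membership in a permuted list filters the same elements.
theorem filter_contains_perm {l t t' : List String} (ht : t.Perm t') (p : Bool → Bool) :
    l.filter (fun i => p (t.contains i)) = l.filter (fun i => p (t'.contains i)) := by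
  apply List.filter_congr
  intro z _
  have : t.contains z = t'.contains z := by
    simp [List.contains_eq_mem, ht.mem_iff]
  rw [this]

-- ===== VERDICT (by name: the statement is the Claim_ definition above) =====
theorem df_spec : Claim_equal_df := by
  intro M N _
  unfold Spec_df df df_alt
  dsimp only
  rw [foldl_skip_if_contains, foldl_skip_if_contains]
  simp only [List.nil_append]
  set mk := PySem.List.dedup (M.map (·.1)) with hmk
  set nk := PySem.List.dedup (N.map (·.1)) with hnk
  set sa := PySem.List.sorted mk (fun k => k) false with hsa
  set sb := PySem.List.sorted nk (fun k => k) false with hsb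
  have hpa : sa.Perm mk := PySem.List.sorted_perm mk (fun k => k) false
  have hpb : sb.Perm nk := PySem.List.sorted_perm nk (fun k => k) false
  have hsorta : sa.Pairwise (· < ·) := by
    rw [hsa, hmk]; simp only [PySem.List.dedup_eq_ofList]
    exact PySem.List.sorted_ofList_pairwise_lt _
  have hsortb : sb.Pairwise (· < ·) := by
    rw [hsb, hnk]; simp only [PySem.List.dedup_eq_ofList]
    exact PySem.List.sorted_ofList_pairwise_lt _
  apply PySem.List.sorted_eq_of_perm_of_pairwise_lt
  · -- (mergeSD sa sb).Perm (mk.filter (∉ nk) ++ nk.filter (∉ mk))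
    refine (mergeSD_perm hsorta hsortb).trans (List.Perm.append ?_ ?_)
    · rw [filter_contains_perm hpb (fun b => !b)]
      exact hpa.filter _
    · rw [filter_contains_perm hpa (fun b => !b)]
      exact hpb.filter _
  · exact pairwise_mergeSD hsorta hsortb
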